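-- pv_equiv track=rewrite | github.com/mreza-kiani/graph-generalization-algorithm | src/main/resources/scripts/call_graph/convertor.py | extract_graph
-- ===== SOURCE A (Python) =====
-- def remove_package_names(phrase):
--     if phrase.startswith('java.'):
--         return None
--     # return phrase
--     parts = phrase.split("(")
--     result = parts[0].split('.')[-1] + '('
--     arguments = parts[1][:-1].split('-')
--     short_args = []
--     for arg in arguments:
--         short_args.append(arg.split('.')[-1])
--     result += '-'.join(short_args) + ')'
--     return result
--
-- def extract_graph(lines):
--     vertices = set()
--     edges = {}
--     for line in lines:
--         if line.startswith('M:'):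
--             parts = line.split(' ')
--             tail = remove_package_names(parts[0][2:].strip().replace(',', '-'))
--             head = remove_package_names(parts[1][3:].strip().replace(',', '-'))
--             if tail not in edges:
--                 edges[tail] = []
--                 vertices.add(tail)
--             if head is not None:
--                 edges[tail].append(head)
--                 vertices.add(head)
--     edges = {k: v for k, v in edges.items() if len(v) != 0}
--
--     return vertices, edges
-- ===== SOURCE B (Python) =====
-- def remove_package_names(phrase):
--     if phrase.startswith('java.'):
--         return None
--     parts = phrase.split("(")
--     result = parts[0].split('.')[-1] + '('
--     arguments = parts[1][:-1].split('-')
--     short_args = []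
--     for arg in arguments:
--         short_args.append(arg.split('.')[-1])
--     result += '-'.join(short_args) + ')'
--     return result
--
--
-- def extract_graph(lines):
--     calls = []
--     for line in lines:
--         if line.startswith('M:'):
--             parts = line.split(' ')
--             calls.append((remove_package_names(parts[0][2:].strip().replace(',', '-')),
--                           remove_package_names(parts[1][3:].strip().replace(',', '-'))))
--     vertices = {v for t, h in calls for v in ([t] if h is None else [t, h])}
--     edges = {}
--     for t in dict.fromkeys(t for t, _ in calls):
--         heads = [h for t2, h in calls if t2 == t and h is not None]
--         if heads:
--             edges[t] = heads
--     return vertices, edges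
-- ===== Notes on version B (the rewrite author's own statement) =====
-- stated objective: alternative
-- what changed: A builds the edge dict incrementally (setdefault-style key creation plus in-place list append, vertices maintained alongside) and filters empty lists afterwards; B is a group-by: it derives the vertex set by one comprehension over the parsed calls and, for each first-occurrence-distinct tail, collects that tail's heads with an inner scan over all calls, inserting a key only when its head list is non-empty, so the dict mutation loop and the post-filter disappear.
import Mathlib
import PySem

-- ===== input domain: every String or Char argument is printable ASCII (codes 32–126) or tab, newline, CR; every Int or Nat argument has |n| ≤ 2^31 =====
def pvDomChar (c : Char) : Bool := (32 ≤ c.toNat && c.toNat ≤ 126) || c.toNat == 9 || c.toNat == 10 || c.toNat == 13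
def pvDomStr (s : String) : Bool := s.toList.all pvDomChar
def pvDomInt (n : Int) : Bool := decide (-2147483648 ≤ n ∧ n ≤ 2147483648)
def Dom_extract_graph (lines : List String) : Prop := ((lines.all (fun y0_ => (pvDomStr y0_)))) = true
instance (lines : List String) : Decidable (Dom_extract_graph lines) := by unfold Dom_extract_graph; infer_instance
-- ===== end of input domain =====

-- B replaces A's incremental dict/set mutation by a group-by: parse the calls once, derive the
-- vertex set from them, and collect each distinct tail's heads by an inner scan, keeping only
-- non-empty head lists (objective: alternative); same return value on Pre_.

-- ===== PORT A =====
-- s.split(sep) for a nonempty literal sep (split? is some there; getD never hit)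
def pySplit (s sep : String) : List String := (PySem.Str.split? s sep).getD []

-- shared module helper remove_package_names (verbatim in both Source A and Source B);
-- outer Option: none = the IndexError on phrase.split("(")[1] when '(' is absent (excluded by Pre_)
def remove_package_names (phrase : String) : Option (Option String) :=
  if PySem.Str.startswith phrase "java." then some none
  else
    let parts := pySplit phrase "("
    match PySem.List.pyGet? parts 1 with
    | none => none  -- Python raises IndexError here
    | some p1 =>
      -- parts[0] always exists (split is never empty): getD is never hit
      let result := ((PySem.List.pyGet? (pySplit ((PySem.List.pyGet? parts 0).getD "") ".") (-1)).getD "") ++ "("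
      let arguments := pySplit (PySem.Str.slice p1 none (some (-1))) "-"
      let shortArgs := arguments.foldl (fun acc arg =>
        acc ++ [(PySem.List.pyGet? (pySplit arg ".") (-1)).getD ""]) []
      some (some (result ++ PySem.Str.join "-" shortArgs ++ ")"))

-- tail = remove_package_names(parts[0][2:].strip().replace(',', '-'))  (same line in Source A and Source B)
def tail_of (line : String) : Option (Option String) :=
  remove_package_names (PySem.Str.replace (PySem.Str.strip
    (PySem.Str.slice ((PySem.List.pyGet? (pySplit line " ") 0).getD "") (some 2) none)) "," "-")

-- head = remove_package_names(parts[1][3:].strip().replace(',', '-')); outer bind: parts[1] may raise IndexError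
def head_of (line : String) : Option (Option String) :=
  (PySem.List.pyGet? (pySplit line " ") 1).bind (fun p1 => remove_package_names
    (PySem.Str.replace (PySem.Str.strip (PySem.Str.slice p1 (some 3) none)) "," "-"))

-- body of A's loop after tail/head are parsed: conditional vertex+key creation, then head append
def stepA (st : PySem.Set (Option String) × PySem.Dict (Option String) (List String))
    (p : Option String × Option String) :
    PySem.Set (Option String) × PySem.Dict (Option String) (List String) :=
  let st1 := if st.2.contains p.1 then st else (PySem.Set.add st.1 p.1, st.2.insert p.1 [])
  match p.2 with
  | none => st1
  | some h => (PySem.Set.add st1.1 (some h), st1.2.modify p.1 [] (· ++ [h]))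

-- port of A: one fold over lines threading (vertices, edges) exactly as A's loop body does
def extract_graph (lines : List String) : List (Option String) × (List (Option String × List String)) :=
  let st := lines.foldl (fun st line =>
    if PySem.Str.startswith line "M:" then
      match tail_of line, head_of line with
      | some tail, some head => stepA st (tail, head)
      | _, _ => st  -- Python raises IndexError on this line (excluded by Pre_)
    else st) (PySem.Set.empty, PySem.Dict.empty)
  (st.1, (PySem.Dict.ofList (st.2.items.filter (fun q => !(q.2.length == 0)))).items)

-- ===== PORT B =====
-- Source B's first loop: collect the parsed (tail, head) pairs of the 'M:' lines
def calls_of (lines : List String) : List (Option String × Option String) :=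
  lines.foldl (fun acc line =>
    if PySem.Str.startswith line "M:" then
      match tail_of line with
      | none => acc  -- Python raises IndexError on this line (excluded by Pre_)
      | some t =>
        match head_of line with
        | none => acc  -- Python raises IndexError on this line (excluded by Pre_)
        | some h => acc ++ [(t, h)]
    else acc) []

-- '[t] if h is None else [t, h]' (Source B's vertex comprehension)
def verts_of (p : Option String × Option String) : List (Option String) :=
  match p.2 with
  | none => [p.1]
  | some h => [p.1, some h]

-- '[h for t2, h in calls if t2 == t and h is not None]' (Source B's inner scan)
def heads_of (calls : List (Option String × Option String)) (t : Option String) : List String :=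
  calls.filterMap (fun q => if q.1 == t then q.2 else none)

def extract_graph_alt (lines : List String) : List (Option String) × (List (Option String × List String)) :=
  let calls := calls_of lines
  let vertices : PySem.Set (Option String) := PySem.Set.ofList (calls.flatMap verts_of)
  -- 'for t in dict.fromkeys(...)' = the first-occurrence-distinct tails, in order
  let edges := (PySem.List.dedup (calls.map Prod.fst)).foldl (fun d t =>
      let hs := heads_of calls t
      if !(hs.length == 0) then d.insert t hs else d) PySem.Dict.empty
  (vertices, edges.items)

-- ===== PRECONDITION & SPEC =====
-- the phrase either names a java.* call (returns None) or contains '(' (split on '(' has ≥ 2 parts) — otherwise A raises IndexError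
def phraseOk (p : String) : Bool :=
  PySem.Str.startswith p "java." || decide (2 ≤ (pySplit p "(").length)

def lineOk (line : String) : Bool :=
  !(PySem.Str.startswith line "M:") ||
  (let parts := pySplit line " "
   decide (2 ≤ parts.length) &&
   phraseOk (PySem.Str.replace (PySem.Str.strip
     (PySem.Str.slice ((PySem.List.pyGet? parts 0).getD "") (some 2) none)) "," "-") &&
   phraseOk (PySem.Str.replace (PySem.Str.strip
     (PySem.Str.slice ((PySem.List.pyGet? parts 1).getD "") (some 3) none)) "," "-"))

-- Pre_ excludes exactly the inputs where A raises IndexError: an 'M:' line without a second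
-- space-separated field, or a parsed phrase that neither starts with 'java.' nor contains '('.
def Pre_extract_graph (lines : List String) : Prop := lines.all lineOk = true
instance (lines : List String) : Decidable (Pre_extract_graph lines) := by unfold Pre_extract_graph; infer_instance

def pvWitness_extract_graph : List String :=
  ["M:com.a.Foo.bar(int,c.D) (M)java.util.List.add(x)", "C:ignored", "M:p.Q.r() (S)p.Q.s(a.b)"]

def Spec_extract_graph (lines : List String) (out : List (Option String) × (List (Option String × List String))) : Prop := out = extract_graph_alt lines
instance (lines : List String) (out : List (Option String) × (List (Option String × List String))) : Decidable (Spec_extract_graph lines out) := by unfold Spec_extract_graph; infer_instance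

-- ===== CLAIM (what is proved, stated in full; the proofs are below) =====
def Claim_equal_extract_graph : Prop := ∀ (lines : List String), Dom_extract_graph lines → Pre_extract_graph lines → Spec_extract_graph lines (extract_graph lines)

-- ===== LEMMAS AND PROOFS =====

-- the parsed pairs of the admitted 'M:' lines (proof-side characterisation shared by both ports)
def parse_call (line : String) : Option (Option String × Option String) :=
  (tail_of line).bind (fun tail => (head_of line).bind (fun head => some (tail, head)))

def pairsOf (lines : List String) : List (Option String × Option String) :=
  (lines.filter (fun l => PySem.Str.startswith l "M:")).filterMap parse_call

theorem pyGet?_one_of_two_le {α : Type} {l : List α} (h : 2 ≤ l.length) :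
    ∃ x, PySem.List.pyGet? l 1 = some x := by
  match l, h with
  | a :: b :: rest, _ => exact ⟨b, by simp [PySem.List.pyGet?, PySem.List.pyIdx?]⟩

theorem remove_ok {p : String} (h : phraseOk p = true) :
    ∃ r, remove_package_names p = some r := by
  unfold phraseOk at h
  unfold remove_package_names
  split_ifs with hj
  · exact ⟨none, rfl⟩
  · rcases Bool.or_eq_true_iff.mp h with h1 | h2
    · exact absurd h1 hj
    · obtain ⟨x, hx⟩ := pyGet?_one_of_two_le (of_decide_eq_true h2)
      simp only [hx]
      exact ⟨_, rfl⟩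

theorem parse_ok {line : String} (hok : lineOk line = true)
    (hm : PySem.Str.startswith line "M:" = true) :
    ∃ t h, tail_of line = some t ∧ head_of line = some h := by
  unfold lineOk at hok
  rw [hm] at hok
  simp only [Bool.not_true, Bool.false_or, Bool.and_eq_true] at hok
  obtain ⟨⟨hlen, htail⟩, hhead⟩ := hok
  obtain ⟨t, ht⟩ := remove_ok htail
  obtain ⟨p1, hp1⟩ := pyGet?_one_of_two_le (of_decide_eq_true hlen)
  rw [hp1] at hhead
  obtain ⟨h, hh⟩ := remove_ok hhead
  refine ⟨t, h, ht, ?_⟩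
  unfold head_of
  simp only [hp1, Option.bind_some]
  simpa using hh

-- ---- A's lines loop = a fold of stepA over the parsed pairs ----
theorem lines_to_pairs (lines : List String)
    (hok : ∀ line ∈ lines, lineOk line = true)
    (st : PySem.Set (Option String) × PySem.Dict (Option String) (List String)) :
    lines.foldl (fun st line =>
      if PySem.Str.startswith line "M:" then
        match tail_of line, head_of line with
        | some tail, some head => stepA st (tail, head)
        | _, _ => st
      else st) st
    = (pairsOf lines).foldl stepA st := by
  induction lines generalizing st with
  | nil => rfl
  | cons line rest ih =>
    have hrest : ∀ l ∈ rest, lineOk l = true := fun l hl => hok l (List.mem_cons_of_mem _ hl)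
    cases hm : PySem.Str.startswith line "M:" with
    | false =>
      simp only [pairsOf, List.foldl_cons, List.filter_cons, hm, Bool.false_eq_true, if_false]
      exact ih hrest st
    | true =>
      obtain ⟨t, h, ht, hh⟩ := parse_ok (hok line List.mem_cons_self) hm
      have hp : parse_call line = some (t, h) := by unfold parse_call; rw [ht, hh]; rfl
      simp only [pairsOf, List.foldl_cons, List.filter_cons, hm, if_true, List.filterMap_cons,
        hp, ht, hh]
      exact ih hrest _

-- ---- B's first loop collects exactly those pairs ----
theorem calls_eq_pairs (lines : List String)
    (hok : ∀ line ∈ lines, lineOk line = true) :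
    calls_of lines = pairsOf lines := by
  unfold calls_of
  suffices h : ∀ acc, lines.foldl (fun acc line =>
      if PySem.Str.startswith line "M:" then
        match tail_of line with
        | none => acc
        | some t =>
          match head_of line with
          | none => acc
          | some h => acc ++ [(t, h)]
      else acc) acc = acc ++ pairsOf lines by
    simpa using h []
  induction lines with
  | nil => intro acc; simp [pairsOf]
  | cons line rest ih =>
    intro acc
    have hrest : ∀ l ∈ rest, lineOk l = true := fun l hl => hok l (List.mem_cons_of_mem _ hl)
    cases hm : PySem.Str.startswith line "M:" with
    | false =>
      simp only [pairsOf, List.foldl_cons, List.filter_cons, hm, Bool.false_eq_true, if_false]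
      exact ih hrest acc
    | true =>
      obtain ⟨t, h, ht, hh⟩ := parse_ok (hok line List.mem_cons_self) hm
      have hp : parse_call line = some (t, h) := by unfold parse_call; rw [ht, hh]; rfl
      simp only [pairsOf, List.foldl_cons, List.filter_cons, hm, if_true, List.filterMap_cons,
        hp, ht, hh]
      rw [ih hrest (acc ++ [(t, h)]), List.append_assoc]
      rfl

-- ---- splitting A's stepA fold into its Set part and its Dict part ----
-- body of the Dict half of stepA: conditional key creation, then head append
def stepB (d : PySem.Dict (Option String) (List String)) (p : Option String × Option String) :
    PySem.Dict (Option String) (List String) :=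
  let d1 := d.setdefault p.1 []
  match p.2 with
  | none => d1
  | some h => d1.modify p.1 [] (· ++ [h])

theorem stepA_split (vs : PySem.Set (Option String)) (es : PySem.Dict (Option String) (List String))
    (p : Option String × Option String) (inv : ∀ k, es.contains k = true → k ∈ vs) :
    stepA (vs, es) p = (PySem.Set.update vs (verts_of p), stepB es p) := by
  unfold stepA stepB verts_of
  cases hc : es.contains p.1
  · rw [PySem.Dict.setdefault_of_not_contains _ _ hc]
    cases p2 : p.2 <;>
      simp [PySem.Set.update_cons, PySem.Set.update_nil]
  · have hmem : p.1 ∈ vs := inv _ hc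
    rw [PySem.Dict.setdefault_of_contains _ _ hc]
    cases p2 : p.2 <;>
      simp [PySem.Set.update_cons, PySem.Set.update_nil, PySem.Set.add_of_mem hmem]

theorem stepB_inv (vs : PySem.Set (Option String)) (es : PySem.Dict (Option String) (List String))
    (p : Option String × Option String) (inv : ∀ k, es.contains k = true → k ∈ vs) :
    ∀ k, (stepB es p).contains k = true → k ∈ PySem.Set.update vs (verts_of p) := by
  intro k hk
  unfold stepB at hk
  unfold verts_of
  cases p2 : p.2 with
  | none =>
    rw [p2] at hk
    simp only [PySem.Dict.contains_setdefault] at hk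
    rw [PySem.Set.update_cons, PySem.Set.update_nil]
    rcases Bool.or_eq_true_iff.mp hk with h | h
    · exact (PySem.Set.mem_add _ _ _).mpr (Or.inr (by simpa using h))
    · exact (PySem.Set.mem_add _ _ _).mpr (Or.inl (inv _ h))
  | some h0 =>
    rw [p2] at hk
    simp only [PySem.Dict.contains_modify, PySem.Dict.contains_setdefault] at hk
    rw [PySem.Set.update_cons, PySem.Set.update_cons, PySem.Set.update_nil]
    rcases Bool.or_eq_true_iff.mp hk with h | h
    · exact (PySem.Set.mem_add _ _ _).mpr (Or.inl ((PySem.Set.mem_add _ _ _).mpr (Or.inr (by simpa using h))))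
    · rcases Bool.or_eq_true_iff.mp h with h | h
      · exact (PySem.Set.mem_add _ _ _).mpr (Or.inl ((PySem.Set.mem_add _ _ _).mpr (Or.inr (by simpa using h))))
      · exact (PySem.Set.mem_add _ _ _).mpr (Or.inl ((PySem.Set.mem_add _ _ _).mpr (Or.inl (inv _ h))))

theorem fold_split (P : List (Option String × Option String))
    (vs : PySem.Set (Option String)) (es : PySem.Dict (Option String) (List String))
    (inv : ∀ k, es.contains k = true → k ∈ vs) :
    P.foldl stepA (vs, es) = (PySem.Set.update vs (P.flatMap verts_of), P.foldl stepB es) := by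
  induction P generalizing vs es with
  | nil => simp [PySem.Set.update_nil]
  | cons p P ih =>
    calc (p :: P).foldl stepA (vs, es)
        = P.foldl stepA (stepA (vs, es) p) := rfl
      _ = P.foldl stepA (PySem.Set.update vs (verts_of p), stepB es p) := by
            rw [stepA_split vs es p inv]
      _ = (PySem.Set.update (PySem.Set.update vs (verts_of p)) (P.flatMap verts_of),
            P.foldl stepB (stepB es p)) := ih _ _ (stepB_inv vs es p inv)
      _ = _ := by rw [List.flatMap_cons, PySem.Set.update_append]; rfl

-- ---- characterising the Dict half of A's fold: keys and per-key value ----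
theorem stepB_keys (d : PySem.Dict (Option String) (List String))
    (p : Option String × Option String) :
    (stepB d p).keys = PySem.Set.add d.keys p.1 := by
  unfold stepB
  cases hc : d.contains p.1 with
  | false =>
    rw [PySem.Dict.setdefault_of_not_contains _ _ hc]
    have hc' : (d.insert p.1 []).contains p.1 = true := PySem.Dict.contains_insert_self _ _ _
    have hk : (d.insert p.1 []).keys = d.keys ++ [p.1] :=
      PySem.Dict.keys_insert_of_not_contains d _ hc
    have hmem : p.1 ∉ d.keys := fun hm =>
      by simp [(PySem.Dict.contains_iff_mem_keys d p.1).mpr hm] at hc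
    cases p2 : p.2 with
    | none => rw [hk, PySem.Set.add_of_not_mem hmem]
    | some h =>
      simp only [PySem.Dict.modify]
      rw [PySem.Dict.keys_insert_of_contains _ _ hc', hk, PySem.Set.add_of_not_mem hmem]
  | true =>
    rw [PySem.Dict.setdefault_of_contains _ _ hc]
    have hmem : p.1 ∈ d.keys := (PySem.Dict.contains_iff_mem_keys d p.1).mp hc
    cases p2 : p.2 with
    | none => rw [PySem.Set.add_of_mem hmem]
    | some h =>
      simp only [PySem.Dict.modify]
      rw [PySem.Dict.keys_insert_of_contains _ _ hc, PySem.Set.add_of_mem hmem]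

theorem foldl_stepB_keys (P : List (Option String × Option String))
    (d : PySem.Dict (Option String) (List String)) :
    (P.foldl stepB d).keys = PySem.Set.update d.keys (P.map Prod.fst) := by
  induction P generalizing d with
  | nil => simp [PySem.Set.update_nil]
  | cons p P ih =>
    rw [List.foldl_cons, ih, List.map_cons, PySem.Set.update_cons, stepB_keys]

theorem stepB_getD (d : PySem.Dict (Option String) (List String))
    (p : Option String × Option String) (t : Option String) :
    (stepB d p).getD t [] = d.getD t [] ++ (if p.1 == t then p.2.toList else []) := by
  unfold stepB
  by_cases ht : p.1 = t
  · subst ht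
    have h1 : (d.setdefault p.1 []).getD p.1 [] = d.getD p.1 [] :=
      PySem.Dict.getD_setdefault_self d p.1 [] []
    cases p2 : p.2 with
    | none => simpa using h1
    | some h => simp [PySem.Dict.getD_modify_self, h1]
  · have hne : t ≠ p.1 := Ne.symm ht
    have h1 : (d.setdefault p.1 []).getD t [] = d.getD t [] := by
      rw [PySem.Dict.getD_eq_get?_getD, PySem.Dict.get?_setdefault_of_ne d _ hne,
        ← PySem.Dict.getD_eq_get?_getD]
    cases p2 : p.2 with
    | none => simp [h1, ht]
    | some h =>
      rw [PySem.Dict.getD_modify_of_ne _ _ _ hne, h1]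
      simp [ht]

theorem foldl_stepB_getD (P : List (Option String × Option String))
    (d : PySem.Dict (Option String) (List String)) (t : Option String) :
    (P.foldl stepB d).getD t [] = d.getD t []
      ++ P.flatMap (fun q => (if q.1 == t then q.2 else none).toList) := by
  induction P generalizing d with
  | nil => simp
  | cons p P ih =>
    rw [List.foldl_cons, ih, List.flatMap_cons, ← List.append_assoc, stepB_getD]
    by_cases ht : p.1 = t <;> simp [ht]

theorem flatMap_eq_heads_of (P : List (Option String × Option String)) (t : Option String) :
    P.flatMap (fun q => (if q.1 == t then q.2 else none).toList) = heads_of P t := by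
  unfold heads_of
  rw [List.filterMap_eq_flatMap_toList]

-- items of A's dict fold: the distinct tails in order, each with its collected heads
theorem foldl_stepB_items (P : List (Option String × Option String)) :
    (P.foldl stepB PySem.Dict.empty).items
      = (PySem.Set.ofList (P.map Prod.fst)).map (fun t => (t, heads_of P t)) := by
  have hkeys : (P.foldl stepB PySem.Dict.empty).keys = PySem.Set.ofList (P.map Prod.fst) := by
    rw [foldl_stepB_keys]
    simp [PySem.Dict.keys_empty, PySem.Set.update_nil_left]
  have hnd : (P.foldl stepB PySem.Dict.empty).keys.Nodup := by
    rw [hkeys]; exact PySem.Set.nodup_ofList _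
  rw [PySem.Dict.items_eq_map_keys _ hnd [], hkeys]
  refine List.map_congr_left (fun t ht => ?_)
  rw [foldl_stepB_getD, flatMap_eq_heads_of]
  simp [PySem.Dict.getD_empty]

-- a fold inserting distinct fresh keys under a filter appends exactly the filtered items
theorem foldl_insert_if (l : List (Option String))
    (p : Option String → Bool) (v : Option String → List String)
    (d : PySem.Dict (Option String) (List String))
    (hnd : l.Nodup) (hfresh : ∀ t ∈ l, d.contains t = false) :
    (l.foldl (fun d t => if p t then d.insert t (v t) else d) d).items
      = d.items ++ (l.filter p).map (fun t => (t, v t)) := by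
  induction l generalizing d with
  | nil => simp
  | cons t l ih =>
    have hnd' : l.Nodup := hnd.of_cons
    have htl : t ∉ l := (List.nodup_cons.mp hnd).1
    rw [List.foldl_cons, List.filter_cons]
    cases hp : p t with
    | false =>
      simp only [Bool.false_eq_true, if_false]
      exact ih d hnd' (fun x hx => hfresh x (List.mem_cons_of_mem _ hx))
    | true =>
      simp only [if_true]
      have hfresh' : ∀ x ∈ l, (d.insert t (v t)).contains x = false := by
        intro x hx
        rw [PySem.Dict.contains_insert]
        have hxt : (x == t) = false := by
          simp only [beq_eq_false_iff_ne]
          exact fun hxe => htl (hxe ▸ hx)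
        rw [hxt, Bool.false_or]
        exact hfresh x (List.mem_cons_of_mem _ hx)
      rw [ih (d.insert t (v t)) hnd' hfresh',
        PySem.Dict.items_insert_of_not_contains d _ (hfresh t List.mem_cons_self)]
      simp

-- Dict.ofList on a list with distinct keys reproduces the list as its items
theorem items_ofList_of_nodup_keys (l : List (Option String × List String))
    (hnd : (l.map Prod.fst).Nodup) :
    (PySem.Dict.ofList l).items = l := by
  have h := PySem.Dict.items_foldl_insert_fresh (l := l) (k := Prod.fst) (v := Prod.snd)
    (d := PySem.Dict.empty) (by intro a _; exact PySem.Dict.contains_empty _) hnd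
  simpa [PySem.Dict.ofList, PySem.Dict.update] using h

-- a single equation for the whole edges computation: A's filtered dict = B's group-by dict
theorem edges_eq (P : List (Option String × Option String)) :
    (PySem.Dict.ofList ((P.foldl stepB PySem.Dict.empty).items.filter
        (fun q => !(q.2.length == 0)))).items
      = ((PySem.List.dedup (P.map Prod.fst)).foldl (fun d t =>
          if !((heads_of P t).length == 0) then d.insert t (heads_of P t) else d)
          PySem.Dict.empty).items := by
  have hA : ((P.foldl stepB PySem.Dict.empty).items.filter (fun q => !(q.2.length == 0)))
      = ((PySem.Set.ofList (P.map Prod.fst)).filter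
          (fun t => !((heads_of P t).length == 0))).map (fun t => (t, heads_of P t)) := by
    rw [foldl_stepB_items, List.filter_map]
    rfl
  have hndk : (((PySem.Set.ofList (P.map Prod.fst)).filter
      (fun t => !((heads_of P t).length == 0))).map (fun t => (t, heads_of P t))).map Prod.fst
      = (PySem.Set.ofList (P.map Prod.fst)).filter (fun t => !((heads_of P t).length == 0)) := by
    rw [List.map_map]
    exact List.map_id' _
  rw [hA, PySem.List.dedup_eq_ofList,
    foldl_insert_if _ _ _ _ (PySem.Set.nodup_ofList _) (fun t _ => PySem.Dict.contains_empty _),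
    items_ofList_of_nodup_keys _ (by rw [hndk]; exact (PySem.Set.nodup_ofList _).filter _)]
  rfl

-- ===== VERDICT (by name: the statement is the Claim_ definition above) =====
theorem extract_graph_spec : Claim_equal_extract_graph := by
  intro lines _hdom hpre
  unfold Spec_extract_graph extract_graph extract_graph_alt
  have hok : ∀ line ∈ lines, lineOk line = true := fun l hl => List.all_eq_true.mp hpre l hl
  rw [lines_to_pairs lines hok, fold_split _ _ _ (by intro k hk; simp at hk),
    calls_eq_pairs lines hok]
  dsimp only
  rw [PySem.Set.update_empty, edges_eq]
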